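-- pv_equiv track=rewrite | github.com/Gsha36/AirCanvas | air_draw.py | color_from_toolbar
-- ===== SOURCE A (Python) =====
-- SWATCH_SIZE = (80, 60)        # w, h
--
-- SWATCH_PADDING = 20
--
-- TOOLBAR_Y = 10
--
-- COLOR_SWATCHES = [
--     ("White", (255, 255, 255)),
--     ("Red",   (0,   0, 255)),
--     ("Green", (0, 255,   0)),
--     ("Blue",  (255, 0,   0)),
--     ("Yellow",(0, 255, 255)),
--     ("Purple",(255, 0, 255)),
--     ("Black", (0,   0,   0)),
-- ]
--
-- def color_from_toolbar(point):
--     x = SWATCH_PADDING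
--     for _, bgr in COLOR_SWATCHES:
--         w, h = SWATCH_SIZE
--         rect = (x, TOOLBAR_Y, x+w, TOOLBAR_Y+h)
--         if rect[0] <= point[0] <= rect[2] and rect[1] <= point[1] <= rect[3]:
--             return ("color", bgr)
--         x += w + SWATCH_PADDING
--     # Eraser tile
--     w, h = SWATCH_SIZE
--     rect = (x, TOOLBAR_Y, x+w, TOOLBAR_Y+h)
--     if rect[0] <= point[0] <= rect[2] and rect[1] <= point[1] <= rect[3]:
--         return ("eraser", None)
--     return (None, None)
-- ===== SOURCE B (Python) =====
-- SWATCH_SIZE = (80, 60)        # w, h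
-- SWATCH_PADDING = 20
-- TOOLBAR_Y = 10
-- COLOR_SWATCHES = [
--     ("White", (255, 255, 255)),
--     ("Red",   (0,   0, 255)),
--     ("Green", (0, 255,   0)),
--     ("Blue",  (255, 0,   0)),
--     ("Yellow",(0, 255, 255)),
--     ("Purple",(255, 0, 255)),
--     ("Black", (0,   0,   0)),
-- ]
--
-- def color_from_toolbar(point):
--     w, h = SWATCH_SIZE
--     if not (TOOLBAR_Y <= point[1] <= TOOLBAR_Y + h):
--         return (None, None)
--     off = point[0] - SWATCH_PADDING
--     if off < 0:
--         return (None, None)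
--     pitch = w + SWATCH_PADDING
--     idx = off // pitch
--     if off - idx * pitch > w:
--         return (None, None)
--     if idx < 7:
--         return ("color", COLOR_SWATCHES[idx][1])
--     if idx == 7:
--         return ("eraser", None)
--     return (None, None)
-- ===== Notes on version B (the rewrite author's own statement) =====
-- stated objective: simpler
-- what changed: Replaces the per-swatch scan with a direct arithmetic computation: one floor division by the tile pitch (100) maps x to a tile index, a remainder test excludes the gaps, and the index selects the color or the eraser.
import Mathlib
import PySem

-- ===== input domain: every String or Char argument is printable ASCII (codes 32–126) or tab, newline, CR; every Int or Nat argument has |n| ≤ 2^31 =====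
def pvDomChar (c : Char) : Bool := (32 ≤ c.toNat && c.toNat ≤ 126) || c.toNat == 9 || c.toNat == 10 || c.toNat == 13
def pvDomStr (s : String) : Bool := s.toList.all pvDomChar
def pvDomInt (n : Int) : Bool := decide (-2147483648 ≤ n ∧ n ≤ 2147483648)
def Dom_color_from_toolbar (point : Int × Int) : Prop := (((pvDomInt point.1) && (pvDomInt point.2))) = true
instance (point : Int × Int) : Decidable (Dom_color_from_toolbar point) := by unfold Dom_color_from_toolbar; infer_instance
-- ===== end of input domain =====

-- B replaces A's per-swatch scan with a direct floor-division tile-index computation (objective: simpler).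

-- COLOR_SWATCHES (name, bgr)
def pvSwatches : List (String × (Int × Int × Int)) :=
  [("White", (255, 255, 255)), ("Red", (0, 0, 255)), ("Green", (0, 255, 0)),
   ("Blue", (255, 0, 0)), ("Yellow", (0, 255, 255)), ("Purple", (255, 0, 255)),
   ("Black", (0, 0, 0))]

-- ===== PORT A =====
-- the `for _, bgr in COLOR_SWATCHES` loop carrying the running x, then the eraser tile
def pvLoopA (point : Int × Int) : List (String × (Int × Int × Int)) → Int →
    Option String × (Option (Int × Int × Int))
  | [], x =>
    -- eraser tile after the loop
    if x ≤ point.1 ∧ point.1 ≤ x + 80 ∧ 10 ≤ point.2 ∧ point.2 ≤ 10 + 60 then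
      (some "eraser", none)
    else (none, none)
  | (_, bgr) :: rest, x =>
    if x ≤ point.1 ∧ point.1 ≤ x + 80 ∧ 10 ≤ point.2 ∧ point.2 ≤ 10 + 60 then
      (some "color", some bgr)
    else pvLoopA point rest (x + 80 + 20)

def color_from_toolbar (point : Int × Int) : Option String × (Option (Int × Int × Int)) :=
  pvLoopA point pvSwatches 20

-- ===== PORT B =====
def color_from_toolbar_alt (point : Int × Int) : Option String × (Option (Int × Int × Int)) :=
  if ¬ (10 ≤ point.2 ∧ point.2 ≤ 10 + 60) then (none, none)
  else
    let off := point.1 - 20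
    if off < 0 then (none, none)
    else
      let idx := PySem.Int.floordiv off (80 + 20)
      if off - idx * (80 + 20) > 80 then (none, none)
      else if idx < 7 then
        -- COLOR_SWATCHES[idx][1]; idx is in [0,7) here so the lookup never fails
        (some "color", some ((PySem.List.pyGet? pvSwatches idx).getD ("", (0, 0, 0))).2)
      else if idx = 7 then (some "eraser", none)
      else (none, none)

-- ===== PRECONDITION & SPEC =====
def Spec_color_from_toolbar (point : Int × Int) (out : Option String × (Option (Int × Int × Int))) : Prop := out = color_from_toolbar_alt point
instance (point : Int × Int) (out : Option String × (Option (Int × Int × Int))) : Decidable (Spec_color_from_toolbar point out) := by unfold Spec_color_from_toolbar; infer_instance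

-- ===== CLAIM (what is proved, stated in full; the proofs are below) =====
def Claim_equal_color_from_toolbar : Prop := ∀ (point : Int × Int), Dom_color_from_toolbar point → Spec_color_from_toolbar point (color_from_toolbar point)

-- ===== LEMMAS AND PROOFS =====

set_option maxHeartbeats 2000000 in
-- ===== VERDICT (by name: the statement is the Claim_ definition above) =====
theorem color_from_toolbar_spec : Claim_equal_color_from_toolbar := by
  rintro ⟨px, py⟩ _
  unfold Spec_color_from_toolbar color_from_toolbar color_from_toolbar_alt
  simp only [pvSwatches, pvLoopA]
  rw [PySem.Int.floordiv_eq_ediv_of_pos (by norm_num : (0:Int) < 80 + 20)]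
  by_cases hy : 10 ≤ py ∧ py ≤ 70
  · by_cases hx0 : px - 20 < 0
    · split_ifs <;> first | rfl | omega
    · set k := (px - 20) / (80 + 20) with hk
      have hk' : (px - 20) / (80 + 20) = k := hk.symm
      have hk0 : 0 ≤ k := by omega
      by_cases hrem : px - 20 - k * (80 + 20) > 80
      · split_ifs <;> first | rfl | omega
      · by_cases h7 : k < 7
        · interval_cases k <;> split_ifs <;> first | rfl | omega
        · split_ifs <;> first | rfl | omega
  · split_ifs <;> first | rfl | omega
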